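-- pv_equiv track=rewrite | github.com/PedroMartz89/dam2 | SGE/Python/EjResueltos/Ejercicio_Python_Tuplas.py | generar_diccionario
-- ===== SOURCE A (Python) =====
-- def generar_diccionario(matriz, nombres):
--     diccionario = {}
--     for nombre in nombres:
--         diccionario[nombre] = []
--     for f in range(len(matriz)):
--         for c in range(len(matriz)):
--             nombre = matriz[f][c]
--             if nombre in diccionario:
--                 diccionario[nombre].append((f, c))
--     return diccionario
-- ===== SOURCE B (Python) =====
-- def generar_diccionario(matriz, nombres):
--     # Name-major: for each requested name, search the whole (square-indexed)
--     # grid for its positions; no dict is filled during a grid scan.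
--     n = len(matriz)
--     return {nombre: [(f, c) for f in range(n) for c in range(n)
--                      if matriz[f][c] == nombre]
--             for nombre in nombres}
-- ===== Notes on version B (the rewrite author's own statement) =====
-- stated objective: alternative
-- what changed: A pre-seeds a dict with the names and fills it during one membership-filtered cell-major grid scan; B is name-major: for each requested name it searches the whole grid for that name's positions with a per-name comprehension, building the dict in one comprehension over nombres (it trades one shared scan for m independent per-name scans).
import Mathlib
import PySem

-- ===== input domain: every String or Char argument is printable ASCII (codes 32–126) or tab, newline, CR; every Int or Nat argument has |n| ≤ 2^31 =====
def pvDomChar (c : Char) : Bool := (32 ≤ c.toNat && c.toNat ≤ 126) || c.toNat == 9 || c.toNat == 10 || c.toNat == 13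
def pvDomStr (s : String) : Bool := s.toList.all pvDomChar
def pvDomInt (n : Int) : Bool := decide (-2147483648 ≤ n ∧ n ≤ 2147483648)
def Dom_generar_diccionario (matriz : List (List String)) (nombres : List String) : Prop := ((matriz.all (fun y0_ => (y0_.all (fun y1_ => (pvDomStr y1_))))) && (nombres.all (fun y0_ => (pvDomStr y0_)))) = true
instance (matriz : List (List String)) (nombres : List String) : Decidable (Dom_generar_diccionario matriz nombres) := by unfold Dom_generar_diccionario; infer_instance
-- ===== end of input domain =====

-- B is name-major: for each requested name it searches the whole grid for that name's
-- positions (one per-name comprehension), instead of A's pre-seeded dict filled during one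
-- membership-filtered cell-major scan (alternative decomposition; equivalence proved below).


-- ===== PORT A =====
def generar_diccionario (matriz : List (List String)) (nombres : List String) : List (String × List (Int × Int)) :=
  -- diccionario = {}; for nombre in nombres: diccionario[nombre] = []
  let d0 : PySem.Dict String (List (Int × Int)) :=
    nombres.foldl (fun d nombre => d.insert nombre []) PySem.Dict.empty
  -- for f in range(len(matriz)): for c in range(len(matriz)): …
  let d : PySem.Dict String (List (Int × Int)) :=
    (PySem.List.pyRange 0 (matriz.length : Int) 1).foldl (fun d f =>
      (PySem.List.pyRange 0 (matriz.length : Int) 1).foldl (fun d c =>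
        let nombre := PySem.List.pyGetD (PySem.List.pyGetD matriz f []) c ""
        -- if nombre in diccionario: diccionario[nombre].append((f, c))
        if d.contains nombre then d.modify nombre [] (fun l => l ++ [(f, c)]) else d) d) d0
  d.items

-- ===== PORT B =====
def generar_diccionario_alt (matriz : List (List String)) (nombres : List String) : List (String × List (Int × Int)) :=
  -- n = len(matriz)
  let n : Int := (matriz.length : Int)
  -- {nombre: [(f, c) for f in range(n) for c in range(n) if matriz[f][c] == nombre] for nombre in nombres}
  (nombres.foldl (fun d nombre =>
      d.insert nombre
        ((PySem.List.pyRange 0 n 1).foldl (fun l f =>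
          (PySem.List.pyRange 0 n 1).foldl (fun l c =>
            if PySem.List.pyGetD (PySem.List.pyGetD matriz f []) c "" == nombre
            then l ++ [(f, c)] else l) l) []))
    PySem.Dict.empty).items

-- ===== PRECONDITION & SPEC =====
-- Pre_ excludes exactly the inputs on which the Python A raises IndexError: A scans columns with
-- range(len(matriz)), so every row must have at least len(matriz) entries.
def Pre_generar_diccionario (matriz : List (List String)) (nombres : List String) : Prop :=
  ∀ row ∈ matriz, matriz.length ≤ row.length
instance (matriz : List (List String)) (nombres : List String) : Decidable (Pre_generar_diccionario matriz nombres) := by unfold Pre_generar_diccionario; infer_instance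
def pvWitness_generar_diccionario : List (List String) × List String :=
  ([["a", "b"], ["b", "a"]], ["a", "x", "a"])

def Spec_generar_diccionario (matriz : List (List String)) (nombres : List String) (out : List (String × List (Int × Int))) : Prop := out = generar_diccionario_alt matriz nombres
instance (matriz : List (List String)) (nombres : List String) (out : List (String × List (Int × Int))) : Decidable (Spec_generar_diccionario matriz nombres out) := by unfold Spec_generar_diccionario; infer_instance

-- ===== CLAIM (what is proved, stated in full; the proofs are below) =====
def Claim_equal_generar_diccionario : Prop := ∀ (matriz : List (List String)) (nombres : List String), Dom_generar_diccionario matriz nombres → Pre_generar_diccionario matriz nombres → Spec_generar_diccionario matriz nombres (generar_diccionario matriz nombres)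

-- ===== LEMMAS AND PROOFS =====

-- the matrix cells in row-major scan order, as (value, (row, col)) pairs
def pvCells (matriz : List (List String)) : List (String × (Int × Int)) :=
  (List.range matriz.length).flatMap (fun f =>
    (List.range matriz.length).map (fun c =>
      ((matriz.getD f []).getD c "", ((f : Int), (c : Int)))))

-- a nested pyRange scan over the square index set is the fold over pvCells (any state type)
theorem pv_scan_eq {σ : Type} (matriz : List (List String))
    (step : σ → String → Int × Int → σ) (d : σ) :
    (PySem.List.pyRange 0 (matriz.length : Int) 1).foldl (fun d f =>
      (PySem.List.pyRange 0 (matriz.length : Int) 1).foldl (fun d c =>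
        step d (PySem.List.pyGetD (PySem.List.pyGetD matriz f []) c "") (f, c)) d) d
      = (pvCells matriz).foldl (fun d p => step d p.1 p.2) d := by
  rw [pvCells, List.foldl_flatMap]
  simp only [PySem.List.pyRange_zero_nat, List.foldl_map, PySem.List.pyGetD_natCast]

def pvPos (cells : List (String × (Int × Int))) (k : String) : List (Int × Int) :=
  (cells.filter (fun p => p.1 == k)).map (fun p => p.2)

-- B's per-name accumulation over the cells is pvPos
theorem pv_fold_filter (cells : List (String × (Int × Int))) (k : String) (l : List (Int × Int)) :
    cells.foldl (fun l p => if p.1 == k then l ++ [p.2] else l) l = l ++ pvPos cells k := by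
  induction cells generalizing l with
  | nil => simp [pvPos]
  | cons p rest ih =>
    simp only [List.foldl_cons]
    by_cases h : (p.1 == k) = true
    · rw [if_pos h, ih]; simp [pvPos, h]
    · rw [if_neg (by simp [h]), ih]; simp [pvPos, h]

-- A's scan never changes the key list
theorem pv_keys_scanA (cells : List (String × (Int × Int))) (d : PySem.Dict String (List (Int × Int))) :
    (cells.foldl (fun d p => if d.contains p.1 then d.modify p.1 [] (fun l => l ++ [p.2]) else d) d).keys
      = d.keys := by
  induction cells generalizing d with
  | nil => rfl
  | cons p rest ih =>
    simp only [List.foldl_cons]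
    by_cases h : d.contains p.1 = true
    · rw [if_pos h, ih, PySem.Dict.keys_modify, PySem.Dict.keys_insert_of_contains _ _ h]
    · rw [if_neg h, ih]

-- A's scan appends, at every key already present, that key's positions
theorem pv_getD_scanA (cells : List (String × (Int × Int))) (d : PySem.Dict String (List (Int × Int)))
    (k : String) (hk : d.contains k = true) :
    (cells.foldl (fun d p => if d.contains p.1 then d.modify p.1 [] (fun l => l ++ [p.2]) else d) d).getD k []
      = d.getD k [] ++ pvPos cells k := by
  induction cells generalizing d with
  | nil => simp [pvPos]
  | cons p rest ih =>
    simp only [List.foldl_cons]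
    by_cases hc : d.contains p.1 = true
    · rw [if_pos hc]
      have hk' : (d.modify p.1 [] (fun l => l ++ [p.2])).contains k = true := by
        simp [PySem.Dict.contains_modify, hk]
      rw [ih _ hk', PySem.Dict.getD_modify]
      by_cases he : k = p.1
      · subst he; simp [pvPos]
      · have : (p.1 == k) = false := by simpa using fun h => he h.symm
        simp [he, pvPos, this]
    · rw [if_neg hc]
      have he : (p.1 == k) = false := by
        refine beq_eq_false_iff_ne.mpr (fun h => ?_); rw [h] at hc; exact absurd hk hc
      rw [ih _ hk]
      simp [pvPos, he]

-- a fold of inserts with a state-independent value function: lookup inside the key set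
theorem pv_getD_foldl_insert (g : String → List (Int × Int)) (l : List String)
    (d : PySem.Dict String (List (Int × Int)))
    (hd : ∀ k, d.contains k = true → d.getD k [] = g k) (k : String)
    (hk : (l.foldl (fun d x => d.insert x (g x)) d).contains k = true) :
    (l.foldl (fun d x => d.insert x (g x)) d).getD k [] = g k := by
  induction l generalizing d with
  | nil => exact hd k hk
  | cons x rest ih =>
    simp only [List.foldl_cons] at hk ⊢
    refine ih (d.insert x (g x)) (fun k' hk' => ?_) hk
    rw [PySem.Dict.getD_insert]
    by_cases he : k' = x
    · simp [he]
    · rw [if_neg he]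
      refine hd k' ?_
      rw [PySem.Dict.contains_insert] at hk'
      simpa [he] using hk'

-- all values of A's seeded dict d0 are []
theorem pv_getD_seed (l : List String) (d : PySem.Dict String (List (Int × Int)))
    (hd : ∀ k, d.getD k [] = []) (k : String) :
    (l.foldl (fun d x => d.insert x ([] : List (Int × Int))) d).getD k [] = [] := by
  induction l generalizing d with
  | nil => exact hd k
  | cons x rest ih =>
    simp only [List.foldl_cons]
    refine ih _ (fun k' => ?_)
    rw [PySem.Dict.getD_insert]
    by_cases he : k' = x <;> simp [he, hd]

-- ===== VERDICT (by name: the statement is the Claim_ definition above) =====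
theorem generar_diccionario_spec : Claim_equal_generar_diccionario := by
  intro matriz nombres _ _
  unfold Spec_generar_diccionario generar_diccionario generar_diccionario_alt
  dsimp only
  rw [pv_scan_eq (σ := PySem.Dict String (List (Int × Int))) matriz (fun d v p => if d.contains v then d.modify v [] (fun l => l ++ [p]) else d)]
  -- rewrite B's per-name nested scan into pvPos of the cells
  have hB : ∀ nombre : String,
      (PySem.List.pyRange 0 (matriz.length : Int) 1).foldl (fun l f =>
        (PySem.List.pyRange 0 (matriz.length : Int) 1).foldl (fun l c =>
          if PySem.List.pyGetD (PySem.List.pyGetD matriz f []) c "" == nombre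
          then l ++ [(f, c)] else l) l) ([] : List (Int × Int))
        = pvPos (pvCells matriz) nombre := by
    intro nombre
    rw [pv_scan_eq (σ := List (Int × Int)) matriz (fun l v p => if v == nombre then l ++ [p] else l)]
    simpa using pv_fold_filter (pvCells matriz) nombre []
  simp only [hB]
  set cells := pvCells matriz with hcells
  have hkeysA : (cells.foldl (fun d p => if d.contains p.1 then d.modify p.1 [] (fun l => l ++ [p.2]) else d)
      (nombres.foldl (fun d nombre => d.insert nombre []) PySem.Dict.empty)).keys
      = PySem.Set.update ([] : List String) nombres := by
    rw [pv_keys_scanA]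
    simpa using PySem.Dict.keys_foldl_insert nombres (fun _ _ => ([] : List (Int × Int))) PySem.Dict.empty
  have hkeysB : ((nombres.foldl (fun d nombre => d.insert nombre (pvPos cells nombre))
      PySem.Dict.empty) : PySem.Dict String (List (Int × Int))).keys
      = PySem.Set.update ([] : List String) nombres := by
    simpa using PySem.Dict.keys_foldl_insert nombres (fun _ nombre => pvPos cells nombre) PySem.Dict.empty
  have hnodA : (cells.foldl (fun d p => if d.contains p.1 then d.modify p.1 [] (fun l => l ++ [p.2]) else d)
      (nombres.foldl (fun d nombre => d.insert nombre []) PySem.Dict.empty)).keys.Nodup := by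
    rw [pv_keys_scanA]
    exact PySem.Dict.nodup_keys_foldl_insert nombres _ _ (by simp [PySem.Dict.keys_empty])
  have hnodB : ((nombres.foldl (fun d nombre => d.insert nombre (pvPos cells nombre))
      PySem.Dict.empty) : PySem.Dict String (List (Int × Int))).keys.Nodup :=
    PySem.Dict.nodup_keys_foldl_insert nombres _ _ (by simp [PySem.Dict.keys_empty])
  rw [PySem.Dict.items_eq_map_keys _ hnodA ([] : List (Int × Int)),
      PySem.Dict.items_eq_map_keys _ hnodB ([] : List (Int × Int)),
      hkeysA, hkeysB]
  refine List.map_congr_left (fun k hk => ?_)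
  congr 1
  -- A side: seeded with [], key k present, so value = positions of k
  have hcontA : ((nombres.foldl (fun d nombre => d.insert nombre ([] : List (Int × Int))) PySem.Dict.empty)).contains k = true := by
    rw [PySem.Dict.contains_iff_mem_keys]
    have := PySem.Dict.keys_foldl_insert nombres (fun _ _ => ([] : List (Int × Int))) PySem.Dict.empty
    rw [this]; simpa using hk
  rw [pv_getD_scanA cells _ k hcontA, pv_getD_seed nombres PySem.Dict.empty (fun _ => PySem.Dict.getD_empty _ _) k,
      List.nil_append]
  -- B side: value at k is pvPos cells k directly
  have hcontB : ((nombres.foldl (fun d nombre => d.insert nombre (pvPos cells nombre))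
      PySem.Dict.empty) : PySem.Dict String (List (Int × Int))).contains k = true := by
    rw [PySem.Dict.contains_iff_mem_keys, hkeysB]; exact hk
  rw [pv_getD_foldl_insert (pvPos cells) nombres PySem.Dict.empty
        (fun k' hk' => by simp [PySem.Dict.contains_empty] at hk') k hcontB]
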